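-- pv_equiv track=rewrite | github.com/IvoV2357/ncovrp | run.py | splitZeros
-- ===== SOURCE A (Python) =====
-- def splitZeros(lst):
--     result = []
--     sublst = []
--     for el in lst:
--         if el != 0:
--             sublst.append(el)
--         else:
--             result.append(sublst)
--             sublst = []
--     return result
-- ===== SOURCE B (Python) =====
-- def splitZeros(lst):
--     zidx = [i for i, el in enumerate(lst) if el == 0]
--     result = []
--     prev = 0
--     for i in zidx:
--         result.append(lst[prev:i])
--         prev = i + 1
--     return result
-- ===== Notes on version B (the rewrite author's own statement) =====
-- stated objective: alternative
-- what changed: B first collects the indices of the zero delimiters and then emits each segment as a slice lst[prev:i], instead of A's element-by-element accumulation into a running sublist; trailing elements after the last zero are dropped naturally because there is no final flush.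
import Mathlib
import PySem

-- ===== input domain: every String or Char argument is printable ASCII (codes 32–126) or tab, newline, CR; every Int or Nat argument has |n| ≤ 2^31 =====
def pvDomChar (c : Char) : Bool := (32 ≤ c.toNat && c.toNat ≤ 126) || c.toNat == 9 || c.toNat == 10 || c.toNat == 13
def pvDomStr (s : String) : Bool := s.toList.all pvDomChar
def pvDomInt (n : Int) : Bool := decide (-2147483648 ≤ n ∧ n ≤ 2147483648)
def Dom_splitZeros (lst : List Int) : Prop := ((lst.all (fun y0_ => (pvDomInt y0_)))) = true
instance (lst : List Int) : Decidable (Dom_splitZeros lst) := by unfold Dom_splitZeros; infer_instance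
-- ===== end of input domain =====

-- B rewrites A's element-by-element accumulation as: collect the zero indices, then emit each segment as a slice lst[prev:i] (alternative decomposition, same cost).


-- ===== PORT A =====
def splitZeros (lst : List Int) : List (List Int) :=
  (lst.foldl
    (fun (acc : List (List Int) × List Int) el =>
      if el ≠ 0 then (acc.1, acc.2 ++ [el]) else (acc.1 ++ [acc.2], []))
    ([], [])).1

-- ===== PORT B =====
def splitZeros_alt (lst : List Int) : List (List Int) :=
  let zidx : List Int :=
    ((PySem.List.enumerate lst 0).filter (fun p => p.2 == 0)).map (·.1)
  (zidx.foldl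
    (fun (acc : List (List Int) × Int) i =>
      (acc.1 ++ [PySem.List.slice lst (some acc.2) (some i)], i + 1))
    ([], 0)).1

-- ===== PRECONDITION & SPEC =====
def Spec_splitZeros (lst : List Int) (out : List (List Int)) : Prop := out = splitZeros_alt lst
instance (lst : List Int) (out : List (List Int)) : Decidable (Spec_splitZeros lst out) := by unfold Spec_splitZeros; infer_instance

-- ===== CLAIM (what is proved, stated in full; the proofs are below) =====
def Claim_equal_splitZeros : Prop := ∀ (lst : List Int), Dom_splitZeros lst → Spec_splitZeros lst (splitZeros lst)

-- ===== LEMMAS AND PROOFS =====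

/-- prepend-transform the first segment only -/
def pvMapHead (f : List Int → List Int) : List (List Int) → List (List Int)
  | [] => []
  | x :: xs => f x :: xs

/-- canonical recursive specification of splitting at zeros (trailing segment dropped) -/
def pvS : List Int → List (List Int)
  | [] => []
  | h :: t => if h = 0 then [] :: pvS t else pvMapHead (fun x => h :: x) (pvS t)

/-- A's loop, recursively -/
def pvAuxA : List Int → List Int → List (List Int)
  | _, [] => []
  | cur, h :: t => if h = 0 then cur :: pvAuxA [] t else pvAuxA (cur ++ [h]) t

/-- B's loop, recursively (cons form) -/
def pvLoopB (lst : List Int) : List Int → Int → List (List Int)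
  | [], _ => []
  | i :: is, prev => PySem.List.slice lst (some prev) (some i) :: pvLoopB lst is (i + 1)

/-- B's zero-index list with enumeration start s -/
def pvZ (t : List Int) (s : Int) : List Int :=
  ((PySem.List.enumerate t s).filter (fun p => p.2 == 0)).map (·.1)

theorem pvMapHead_id (xs : List (List Int)) : pvMapHead (fun x => x) xs = xs := by
  cases xs <;> rfl

theorem pvFoldA (l : List Int) : ∀ (res : List (List Int)) (cur : List Int),
    (l.foldl
      (fun (acc : List (List Int) × List Int) el =>
        if el ≠ 0 then (acc.1, acc.2 ++ [el]) else (acc.1 ++ [acc.2], []))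
      (res, cur)).1 = res ++ pvAuxA cur l := by
  induction l with
  | nil => intro res cur; simp [pvAuxA]
  | cons h t ih =>
    intro res cur
    rw [List.foldl_cons]
    by_cases h0 : h = 0
    · have hif : (if h ≠ 0 then (res, cur ++ [h]) else (res ++ [cur], ([] : List Int)))
          = (res ++ [cur], ([] : List Int)) := by simp [h0]
      rw [hif, ih]
      simp [pvAuxA, h0]
    · have hif : (if h ≠ 0 then (res, cur ++ [h]) else (res ++ [cur], ([] : List Int)))
          = (res, cur ++ [h]) := by simp [h0]
      rw [hif, ih]
      simp [pvAuxA, h0]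

theorem pvAuxA_eq (l : List Int) : ∀ cur, pvAuxA cur l = pvMapHead (fun x => cur ++ x) (pvS l) := by
  induction l with
  | nil => intro cur; rfl
  | cons h t ih =>
    intro cur
    by_cases h0 : h = 0
    · simp only [pvAuxA, pvS, if_pos h0, ih]
      cases pvS t <;> simp [pvMapHead]
    · simp only [pvAuxA, pvS, if_neg h0, ih]
      cases pvS t <;> simp [pvMapHead]

theorem pvFoldB (lst : List Int) (idxs : List Int) :
    ∀ (res : List (List Int)) (prev : Int),
    (idxs.foldl
      (fun (acc : List (List Int) × Int) i =>
        (acc.1 ++ [PySem.List.slice lst (some acc.2) (some i)], i + 1))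
      (res, prev)).1 = res ++ pvLoopB lst idxs prev := by
  induction idxs with
  | nil => intro res prev; simp [pvLoopB]
  | cons i is ih =>
    intro res prev
    rw [List.foldl_cons, ih]
    simp [pvLoopB]

theorem pvZ_cons (h : Int) (t : List Int) (s : Int) :
    pvZ (h :: t) s = if h = 0 then s :: pvZ t (s + 1) else pvZ t (s + 1) := by
  by_cases h0 : h = 0 <;>
    simp [pvZ, PySem.List.enumerate_cons, h0]

theorem pvZ_shift (t : List Int) : ∀ s : Int, pvZ t (s + 1) = (pvZ t s).map (· + 1) := by
  induction t with
  | nil => intro s; simp [pvZ, PySem.List.enumerate_nil]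
  | cons h t ih =>
    intro s
    rw [pvZ_cons, pvZ_cons]
    by_cases h0 : h = 0 <;> simp [h0, ih (s + 1)]

theorem pvZ_nonneg (t : List Int) : ∀ s : Int, ∀ i ∈ pvZ t s, s ≤ i := by
  induction t with
  | nil => intro s i hi; simp [pvZ, PySem.List.enumerate_nil] at hi
  | cons h t ih =>
    intro s i hi
    rw [pvZ_cons] at hi
    by_cases h0 : h = 0
    · rw [if_pos h0] at hi
      rcases List.mem_cons.1 hi with rfl | hi
      · omega
      · have := ih (s + 1) i hi; omega
    · rw [if_neg h0] at hi
      have := ih (s + 1) i hi; omega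

theorem pvSlice_shift (h : Int) (t : List Int) (a b : Int) (ha : 0 ≤ a) (hb : 0 ≤ b) :
    PySem.List.slice (h :: t) (some (a + 1)) (some (b + 1)) =
      PySem.List.slice t (some a) (some b) := by
  rw [PySem.List.slice_toNat (h :: t) (by omega) (by omega),
      PySem.List.slice_toNat t ha hb]
  have h1 : (a + 1).toNat = a.toNat + 1 := by omega
  have h2 : (b + 1).toNat = b.toNat + 1 := by omega
  simp [h1, h2]

theorem pvLoopB_shift (h : Int) (t : List Int) (is : List Int) :
    ∀ prev : Int, 0 ≤ prev → (∀ i ∈ is, 0 ≤ i) →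
    pvLoopB (h :: t) (is.map (· + 1)) (prev + 1) = pvLoopB t is prev := by
  induction is with
  | nil => intro prev _ _; rfl
  | cons i is ih =>
    intro prev hp hnn
    have hi : 0 ≤ i := hnn i (by simp)
    simp only [List.map_cons, pvLoopB]
    rw [pvSlice_shift h t prev i hp hi,
        ih (i + 1) (by omega) (fun j hj => hnn j (by simp [hj]))]

theorem pvLoopB_eq_S (lst : List Int) : pvLoopB lst (pvZ lst 0) 0 = pvS lst := by
  induction lst with
  | nil => rfl
  | cons h t ih =>
    have hz1 : pvZ t (0 + 1) = (pvZ t 0).map (· + 1) := pvZ_shift t 0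
    have hnn : ∀ i ∈ pvZ t 0, 0 ≤ i := pvZ_nonneg t 0
    rw [pvZ_cons]
    by_cases h0 : h = 0
    · rw [if_pos h0, hz1]
      simp only [pvLoopB]
      rw [pvLoopB_shift h t _ 0 le_rfl hnn, ih]
      have hsl : PySem.List.slice (h :: t) (some 0) (some 0) = [] := by
        rw [PySem.List.slice_toNat (h :: t) le_rfl le_rfl]
        simp
      rw [hsl]
      simp [pvS, h0]
    · rw [if_neg h0, hz1]
      simp only [pvS, if_neg h0, ← ih]
      cases hzt : pvZ t 0 with
      | nil => rfl
      | cons i is =>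
        have hi : 0 ≤ i := by have := hnn i; rw [hzt] at this; exact this (by simp)
        have hnis : ∀ j ∈ is, 0 ≤ j := by
          intro j hj; have := hnn j; rw [hzt] at this; exact this (by simp [hj])
        simp only [List.map_cons, pvLoopB]
        rw [pvLoopB_shift h t is (i + 1) (by omega) hnis]
        have hsl : PySem.List.slice (h :: t) (some 0) (some (i + 1)) =
            h :: PySem.List.slice t (some 0) (some i) := by
          rw [PySem.List.slice_toNat (h :: t) le_rfl (by omega),
              PySem.List.slice_toNat t le_rfl hi]
          have h1 : (i + 1).toNat = i.toNat + 1 := by omega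
          simp [h1]
        rw [hsl]
        rfl

-- ===== VERDICT (by name: the statement is the Claim_ definition above) =====
theorem splitZeros_spec : Claim_equal_splitZeros := by
  intro lst _
  unfold Spec_splitZeros splitZeros splitZeros_alt
  rw [pvFoldA lst [] [], pvFoldB lst _ [] 0]
  simp only [List.nil_append]
  rw [pvAuxA_eq lst []]
  have h1 : pvMapHead (fun x => [] ++ x) (pvS lst) = pvS lst := by
    simp only [List.nil_append]; exact pvMapHead_id _
  rw [h1]
  exact (pvLoopB_eq_S lst).symm
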